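-- pv_equiv track=rewrite | github.com/sproutsai-engg/coding_question_generator | json_files/python_codes/Q_758.py | addBoldTag
-- ===== SOURCE A (Python) =====
-- def addBoldTag(words, s):
--     bold = [False] * len(s)
--     for word in words:
--         pos = s.find(word)
--         while pos != -1:
--             for i in range(pos, pos + len(word)):
--                 bold[i] = True
--             pos = s.find(word, pos + 1)
--
--     result = []
--     for i in range(len(s)):
--         if bold[i] and (i == 0 or not bold[i - 1]):
--             result.append("<b>")
--         result.append(s[i])
--         if bold[i] and (i == len(s) - 1 or not bold[i + 1]):
--             result.append("</b>")
--
--     return "".join(result)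
-- ===== SOURCE B (Python) =====
-- def addBoldTag(words, s):
--     n = len(s)
--     # one left-to-right sweep: reach = farthest end of any word match starting at or before i
--     bold = []
--     reach = 0
--     for i in range(n):
--         for w in words:
--             if s.startswith(w, i):
--                 reach = max(reach, i + len(w))
--         bold.append(i < reach)
--     out = []
--     i = 0
--     while i < n:
--         if bold[i]:
--             j = i
--             while j < n and bold[j]:
--                 j += 1
--             out.append("<b>")
--             out.append(s[i:j])
--             out.append("</b>")
--             i = j
--         else:
--             out.append(s[i])
--             i += 1
--     return "".join(out)
-- ===== Notes on version B (the rewrite author's own statement) =====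
-- stated objective: alternative
-- what changed: A marks bold positions by repeatedly calling s.find for every word and emits tags character by character; B instead does one left-to-right sweep keeping the farthest match end (startswith at each position) to decide boldness, and renders the output run by run, slicing each maximal bold run out of s at once.
import Mathlib
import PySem

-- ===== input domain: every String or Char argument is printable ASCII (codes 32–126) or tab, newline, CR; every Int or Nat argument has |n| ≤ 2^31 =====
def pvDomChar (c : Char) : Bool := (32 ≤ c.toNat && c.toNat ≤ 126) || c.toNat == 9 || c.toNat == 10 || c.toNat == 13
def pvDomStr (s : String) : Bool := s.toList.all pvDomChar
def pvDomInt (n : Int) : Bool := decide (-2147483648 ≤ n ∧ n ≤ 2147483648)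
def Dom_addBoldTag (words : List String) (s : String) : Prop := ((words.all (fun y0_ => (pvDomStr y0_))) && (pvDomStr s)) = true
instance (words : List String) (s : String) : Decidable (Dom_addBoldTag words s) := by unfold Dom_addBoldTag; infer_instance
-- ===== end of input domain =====

-- B replaces A's per-word repeated s.find scans by one left-to-right farthest-match-end sweep
-- and a run-based renderer (an alternative decomposition of the same task; equivalence proved exactly).

-- ===== PORT A =====
-- A's inner `while pos != -1` loop; fuel is only a totality guard (s.length+2 always suffices,
-- proved in the lemmas below), the computation is step-for-step A's.
def markLoop (fuel : Nat) (s w : List Char) (bold : List Bool) (pos : Int) : List Bool :=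
  match fuel with
  | 0 => bold
  | f+1 =>
    if pos = -1 then bold
    else
      markLoop f s w
        ((List.range' pos.toNat w.length).foldl (fun b i => b.set i true) bold)
        (PySem.Chars.findFrom s w (pos+1) none)

def addBoldTag (words : List String) (s : String) : String :=
  let cs := s.toList
  let n := cs.length
  let bold := words.foldl
    (fun b w => markLoop (n+2) cs w.toList b (PySem.Chars.find cs w.toList))
    (List.replicate n false)
  let result := (List.range n).foldl (fun acc i =>
    let acc1 := if bold.getD i false && (decide (i = 0) || !bold.getD (i-1) false)
                then acc ++ [['<','b','>']] else acc
    let acc2 := acc1 ++ [[cs.getD i ' ']]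
    if bold.getD i false && (decide (i = n-1) || !bold.getD (i+1) false)
    then acc2 ++ [['<','/','b','>']] else acc2) []
  String.ofList result.flatten        -- "".join(result): join with empty separator is flatten

-- ===== PORT B =====
-- s.startswith(w, i) for a valid index i is exactly startswith on the suffix s[i:]
def stepW (cs : List Char) (i : Nat) (r : Nat) (w : String) : Nat :=
  if PySem.Chars.startswith (cs.drop i) w.toList then max r (i + w.toList.length) else r

-- B's marking sweep: state = (reach, bold list so far)
def sweepBold (words : List String) (cs : List Char) : Nat × List Bool :=
  (List.range cs.length).foldl
    (fun st i =>
      let r := words.foldl (stepW cs i) st.1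
      (r, st.2 ++ [decide (i < r)]))
    (0, [])

-- B's inner `while j < n and bold[j]` loop
def runEnd (bold : List Bool) (j : Nat) : Nat :=
  if j < bold.length ∧ bold.getD j false = true then runEnd bold (j+1) else j
termination_by bold.length - j
decreasing_by omega

theorem runEnd_ge (bold : List Bool) (j : Nat) : j ≤ runEnd bold j := by
  fun_induction runEnd bold j with
  | case1 j h ih => omega
  | case2 j h => omega

theorem getD_true_lt (bold : List Bool) (j : Nat) (h : bold.getD j false = true) :
    j < bold.length := by
  by_contra hc
  simp [List.getD_eq_getElem?_getD, List.getElem?_eq_none (by omega : bold.length ≤ j)] at h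

-- B's outer `while i < n` loop
def renderB (cs : List Char) (bold : List Bool) (i : Nat) : List (List Char) :=
  if h : i < cs.length then
    if hb : bold.getD i false = true then
      ['<','b','>'] :: ((cs.drop i).take (runEnd bold i - i)) :: ['<','/','b','>']
        :: renderB cs bold (runEnd bold i)
    else
      [cs.getD i ' '] :: renderB cs bold (i+1)
  else []
termination_by cs.length - i
decreasing_by
  · have h1 : i < bold.length := getD_true_lt bold i hb
    have h2 : i + 1 ≤ runEnd bold (i+1) := runEnd_ge bold (i+1)
    have hs : runEnd bold i = runEnd bold (i+1) := by
      rw [runEnd, if_pos ⟨h1, hb⟩]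
    show cs.length - runEnd bold i < cs.length - i
    omega
  · omega

def addBoldTag_alt (words : List String) (s : String) : String :=
  let cs := s.toList
  let bold := (sweepBold words cs).2
  String.ofList (renderB cs bold 0).flatten

-- ===== PRECONDITION & SPEC =====
def Spec_addBoldTag (words : List String) (s : String) (out : String) : Prop := out = addBoldTag_alt words s
instance (words : List String) (s : String) (out : String) : Decidable (Spec_addBoldTag words s out) := by unfold Spec_addBoldTag; infer_instance

-- ===== CLAIM (what is proved, stated in full; the proofs are below) =====
def Claim_equal_addBoldTag : Prop := ∀ (words : List String) (s : String), Dom_addBoldTag words s → Spec_addBoldTag words s (addBoldTag words s)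

-- ===== LEMMAS AND PROOFS =====

-- "some occurrence of w in cs covers position i"
def CovAt (cs w : List Char) (i : Nat) : Prop :=
  ∃ j : Nat, j ≤ i ∧ i < j + w.length ∧ w <+: cs.drop j

theorem findFrom_past (s w : List Char) :
    PySem.Chars.findFrom s w ((s.length : Int)+1) none = -1 := by
  simp [PySem.Chars.findFrom, show ¬((s.length:Int)+1 < 0) by omega,
        show ((s.length:Int) < (s.length:Int)+1) by omega]

theorem markRange_length (p len : Nat) (bold : List Bool) :
    ((List.range' p len).foldl (fun b i => b.set i true) bold).length = bold.length := by
  induction len generalizing p bold with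
  | zero => rfl
  | succ n ih => simp [List.range'_succ, List.foldl_cons, ih]

theorem markRange_getD (p len : Nat) (bold : List Bool) (i : Nat) (hi : i < bold.length) :
    (((List.range' p len).foldl (fun b i => b.set i true) bold).getD i false = true ↔
      (bold.getD i false = true ∨ (p ≤ i ∧ i < p + len))) := by
  induction len generalizing p bold with
  | zero => simp
  | succ n ih =>
    rw [List.range'_succ, List.foldl_cons]
    rw [ih (p+1) (bold.set p true) (by simpa using hi)]
    by_cases hpi : p = i
    · subst hpi
      simp [List.getD_eq_getElem?_getD, List.getElem?_set_self (by omega : p < bold.length)]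
    · rw [List.getD_eq_getElem?_getD, List.getElem?_set_ne hpi, ← List.getD_eq_getElem?_getD]
      constructor
      · rintro (h | h); exact Or.inl h; exact Or.inr (by omega)
      · rintro (h | h); exact Or.inl h; exact Or.inr (by omega)

theorem prefix_drop_infix {w u : List Char} (m : Nat) (h : w <+: u.drop m) : w <:+: u :=
  h.isInfix.trans (List.drop_suffix m u).isInfix

theorem markLoop_spec (s w : List Char) :
    ∀ (f k : Nat) (bold : List Bool), k ≤ s.length + 1 → bold.length = s.length →
      s.length + 2 - k ≤ f →
      (markLoop f s w bold (PySem.Chars.findFrom s w (k:Int) none)).length = s.length ∧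
      ∀ i < s.length,
        ((markLoop f s w bold (PySem.Chars.findFrom s w (k:Int) none)).getD i false = true ↔
          (bold.getD i false = true ∨ ∃ j : Nat, k ≤ j ∧ j ≤ i ∧ i < j + w.length ∧ w <+: s.drop j)) := by
  intro f
  induction f with
  | zero => intro k bold hk _ hf; omega
  | succ f ih =>
    intro k bold hk hlen hf
    by_cases hk1 : k = s.length + 1
    · have hcast : ((k:Nat):Int) = (s.length:Int)+1 := by push_cast [hk1]; ring
      rw [hcast, findFrom_past]
      rw [markLoop, if_pos rfl]
      refine ⟨hlen, fun i hi => ?_⟩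
      constructor
      · exact Or.inl
      · rintro (h | ⟨j, hj1, hj2, hj3, _⟩)
        · exact h
        · omega
    · have hk2 : k ≤ s.length := by omega
      by_cases hr : PySem.Chars.findFrom s w (k:Int) none = -1
      · rw [hr, markLoop, if_pos rfl]
        have hno : ¬ w <:+: s.drop k := (PySem.Chars.findFrom_natCast_eq_neg_one_iff s w k hk2).mp hr
        refine ⟨hlen, fun i hi => ?_⟩
        constructor
        · exact Or.inl
        · rintro (h | ⟨j, hj1, hj2, hj3, hj4⟩)
          · exact h
          · exfalso
            apply hno
            have : s.drop j = (s.drop k).drop (j - k) := by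
              rw [List.drop_drop]; congr 1; omega
            rw [this] at hj4
            exact prefix_drop_infix _ hj4
      · obtain ⟨hkr, hpref, hmin⟩ := PySem.Chars.findFrom_natCast_spec s w k hk2 hr
        have hrle : PySem.Chars.findFrom s w (k:Int) none ≤ s.length := by
          rw [PySem.Chars.findFrom_natCast s w k hk2]
          rw [PySem.Chars.findFrom_natCast s w k hk2] at hr
          split at hr
          · omega
          · split
            · omega
            · have := PySem.Chars.find_le_length (s.drop k) w
              simp [List.length_drop] at this
              omega
        set r := PySem.Chars.findFrom s w (k:Int) none with hrdef
        have hr0 : 0 ≤ r := le_trans (by omega) hkr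
        set p := r.toNat with hpdef
        have hpk : k ≤ p := by omega
        have hpn : p ≤ s.length := by omega
        have hcast : r + 1 = (((p+1:Nat)):Int) := by push_cast; omega
        rw [markLoop, if_neg hr, hcast]
        have hlen' : ((List.range' r.toNat w.length).foldl (fun b i => b.set i true) bold).length = s.length := by
          rw [markRange_length]; exact hlen
        obtain ⟨ihlen, ihiff⟩ := ih (p+1) _ (by omega) hlen' (by omega)
        refine ⟨ihlen, fun i hi => ?_⟩
        rw [ihiff i hi]
        rw [markRange_getD r.toNat w.length bold i (by omega)]
        constructor
        · rintro (((h | h) | ⟨j, hj1, hj2, hj3, hj4⟩))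
          · exact Or.inl h
          · exact Or.inr ⟨p, hpk, by omega, by omega, hpref⟩
          · exact Or.inr ⟨j, by omega, hj2, hj3, hj4⟩
        · rintro (h | ⟨j, hj1, hj2, hj3, hj4⟩)
          · exact Or.inl (Or.inl h)
          · rcases lt_trichotomy j p with hjp | hjp | hjp
            · exact absurd hj4 (hmin j hj1 hjp)
            · subst hjp
              exact Or.inl (Or.inr ⟨by omega, by omega⟩)
            · exact Or.inr ⟨j, by omega, hj2, hj3, hj4⟩

theorem foldWords_spec (cs : List Char) :
    ∀ (ws : List String) (bold : List Bool), bold.length = cs.length →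
      (ws.foldl (fun b w => markLoop (cs.length+2) cs w.toList b (PySem.Chars.find cs w.toList)) bold).length = cs.length ∧
      ∀ i < cs.length,
        ((ws.foldl (fun b w => markLoop (cs.length+2) cs w.toList b (PySem.Chars.find cs w.toList)) bold).getD i false = true ↔
          (bold.getD i false = true ∨ ∃ w ∈ ws, CovAt cs w.toList i)) := by
  intro ws
  induction ws with
  | nil => intro bold hlen; simp [hlen]
  | cons w ws ih =>
    intro bold hlen
    have hfind : PySem.Chars.find cs w.toList = PySem.Chars.findFrom cs w.toList ((0:Nat):Int) none := by
      rw [Nat.cast_zero, PySem.Chars.findFrom_zero]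
    rw [List.foldl_cons]
    have hspec := markLoop_spec cs w.toList (cs.length+2) 0 bold (by omega) hlen (by omega)
    rw [← hfind] at hspec
    obtain ⟨hlen1, hiff1⟩ := hspec
    obtain ⟨hlen2, hiff2⟩ := ih _ hlen1
    refine ⟨hlen2, fun i hi => ?_⟩
    rw [hiff2 i hi, hiff1 i hi]
    unfold CovAt
    constructor
    · rintro ((h | ⟨j, _, hj2, hj3, hj4⟩) | ⟨w', hw', hc⟩)
      · exact Or.inl h
      · exact Or.inr ⟨w, List.mem_cons_self .., ⟨j, hj2, hj3, hj4⟩⟩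
      · exact Or.inr ⟨w', List.mem_cons_of_mem _ hw', hc⟩
    · rintro (h | ⟨w', hw', hc⟩)
      · exact Or.inl (Or.inl h)
      · rcases List.mem_cons.mp hw' with h | h
        · subst h
          obtain ⟨j, hj1, hj2, hj3⟩ := hc
          exact Or.inl (Or.inr ⟨j, by omega, hj1, hj2, hj3⟩)
        · exact Or.inr ⟨w', h, hc⟩

theorem stepWords_spec (cs : List Char) (i : Nat) :
    ∀ (ws : List String) (r : Nat),
      r ≤ ws.foldl (stepW cs i) r ∧
      (∀ w ∈ ws, w.toList <+: cs.drop i → i + w.toList.length ≤ ws.foldl (stepW cs i) r) ∧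
      (ws.foldl (stepW cs i) r = r ∨
        ∃ w ∈ ws, w.toList <+: cs.drop i ∧ ws.foldl (stepW cs i) r ≤ i + w.toList.length) := by
  intro ws
  induction ws with
  | nil => intro r; refine ⟨le_refl r, by simp, Or.inl rfl⟩
  | cons w ws ih =>
    intro r
    rw [List.foldl_cons]
    obtain ⟨iha, ihb, ihc⟩ := ih (stepW cs i r w)
    by_cases hsw : PySem.Chars.startswith (cs.drop i) w.toList = true
    · have hpre : w.toList <+: cs.drop i := (PySem.Chars.startswith_iff _ _).mp hsw
      have hstep : stepW cs i r w = max r (i + w.toList.length) := by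
        unfold stepW; rw [if_pos hsw]
      refine ⟨?_, ?_, ?_⟩
      · calc r ≤ max r (i + w.toList.length) := le_max_left _ _
          _ = stepW cs i r w := hstep.symm
          _ ≤ _ := iha
      · intro w' hw' hp'
        rcases List.mem_cons.mp hw' with h | h
        · subst h
          calc i + w'.toList.length ≤ max r (i + w'.toList.length) := le_max_right _ _
            _ = stepW cs i r w' := hstep.symm
            _ ≤ _ := iha
        · exact ihb w' h hp'
      · rcases ihc with h | ⟨w', hw', hp', hle⟩
        · rw [h, hstep]
          rcases le_total (i + w.toList.length) r with hm | hm
          · exact Or.inl (by omega)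
          · exact Or.inr ⟨w, List.mem_cons_self .., hpre, by omega⟩
        · exact Or.inr ⟨w', List.mem_cons_of_mem _ hw', hp', hle⟩
    · have hstep : stepW cs i r w = r := by
        unfold stepW; rw [if_neg hsw]
      rw [hstep] at iha ihb ihc ⊢
      refine ⟨iha, ?_, ?_⟩
      · intro w' hw' hp'
        rcases List.mem_cons.mp hw' with h | h
        · subst h
          exact absurd ((PySem.Chars.startswith_iff _ _).mpr hp') hsw
        · exact ihb w' h hp'
      · rcases ihc with h | ⟨w', hw', hp', hle⟩
        · exact Or.inl h
        · exact Or.inr ⟨w', List.mem_cons_of_mem _ hw', hp', hle⟩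

-- the invariant of B's sweep: r is the farthest match end over starts below k
def MaxReach (words : List String) (cs : List Char) (k r : Nat) : Prop :=
  (∀ j, j < k → ∀ w ∈ words, w.toList <+: cs.drop j → j + w.toList.length ≤ r) ∧
  (r = 0 ∨ ∃ j, j < k ∧ ∃ w ∈ words, w.toList <+: cs.drop j ∧ r ≤ j + w.toList.length)

theorem sweep_spec (words : List String) (cs : List Char) :
    ∀ k : Nat,
      ((List.range k).foldl (fun st i =>
          let r := words.foldl (stepW cs i) st.1
          (r, st.2 ++ [decide (i < r)])) ((0:Nat), ([]:List Bool))).2.length = k ∧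
      MaxReach words cs k ((List.range k).foldl (fun st i =>
          let r := words.foldl (stepW cs i) st.1
          (r, st.2 ++ [decide (i < r)])) ((0:Nat), ([]:List Bool))).1 ∧
      ∀ i < k, (((List.range k).foldl (fun st i =>
          let r := words.foldl (stepW cs i) st.1
          (r, st.2 ++ [decide (i < r)])) ((0:Nat), ([]:List Bool))).2.getD i false = true ↔
        ∃ w ∈ words, CovAt cs w.toList i) := by
  intro k
  induction k with
  | zero => exact ⟨rfl, ⟨by omega, Or.inl rfl⟩, by omega⟩
  | succ k ih =>
    obtain ⟨ihlen, ⟨ihub, ihex⟩, ihiff⟩ := ih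
    rw [List.range_succ, List.foldl_append, List.foldl_cons, List.foldl_nil]
    set st := (List.range k).foldl (fun st i =>
          let r := words.foldl (stepW cs i) st.1
          (r, st.2 ++ [decide (i < r)])) ((0:Nat), ([]:List Bool)) with hst
    obtain ⟨ha, hb, hc⟩ := stepWords_spec cs k words st.1
    set r' := words.foldl (stepW cs k) st.1 with hr'
    have hub' : ∀ j, j < k+1 → ∀ w ∈ words, w.toList <+: cs.drop j → j + w.toList.length ≤ r' := by
      intro j hj w hw hp
      rcases Nat.lt_or_ge j k with h | h
      · exact le_trans (ihub j h w hw hp) ha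
      · have : j = k := by omega
        subst this
        exact hb w hw hp
    have hex' : r' = 0 ∨ ∃ j, j < k+1 ∧ ∃ w ∈ words, w.toList <+: cs.drop j ∧ r' ≤ j + w.toList.length := by
      rcases hc with h | ⟨w, hw, hp, hle⟩
      · rw [h]
        rcases ihex with h0 | ⟨j, hj, w, hw, hp, hle⟩
        · exact Or.inl h0
        · exact Or.inr ⟨j, by omega, w, hw, hp, hle⟩
      · exact Or.inr ⟨k, by omega, w, hw, hp, hle⟩
    refine ⟨by simp [ihlen], ⟨hub', hex'⟩, ?_⟩
    intro i hi
    rcases Nat.lt_or_ge i k with h | h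
    · have hgd : (st.2 ++ [decide (k < r')]).getD i false = st.2.getD i false := by
        rw [List.getD_eq_getElem _ false (by simp [ihlen]; omega),
            List.getD_eq_getElem _ false (by omega : i < st.2.length)]
        exact List.getElem_append_left (by omega)
      rw [hgd]
      exact ihiff i h
    · have hik : i = k := by omega
      subst hik
      have hgd : (st.2 ++ [decide (i < r')]).getD i false = decide (i < r') := by
        rw [List.getD_eq_getElem _ false (by simp [ihlen])]
        rw [List.getElem_append_right (by omega : st.2.length ≤ i)]
        simp [ihlen]
      rw [hgd]
      simp only [decide_eq_true_eq]
      constructor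
      · intro hlt
        rcases hex' with h0 | ⟨j, hj, w, hw, hp, hle⟩
        · omega
        · exact ⟨w, hw, j, by omega, by omega, hp⟩
      · rintro ⟨w, hw, j, hj1, hj2, hj3⟩
        have := hub' j (by omega) w hw hj3
        omega

theorem bold_eq (words : List String) (cs : List Char) :
    words.foldl (fun b w => markLoop (cs.length+2) cs w.toList b (PySem.Chars.find cs w.toList))
      (List.replicate cs.length false)
      = (sweepBold words cs).2 := by
  obtain ⟨hlenA, hiffA⟩ := foldWords_spec cs words (List.replicate cs.length false) (by simp)
  obtain ⟨hlenB, _, hiffB⟩ := sweep_spec words cs cs.length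
  have hsb : sweepBold words cs = (List.range cs.length).foldl (fun st i =>
      let r := words.foldl (stepW cs i) st.1
      (r, st.2 ++ [decide (i < r)])) ((0:Nat), ([]:List Bool)) := rfl
  apply List.ext_getElem
  · rw [hlenA, hsb, hlenB]
  · intro i h1 h2
    have hi : i < cs.length := by simpa [hlenA] using h1
    have hgd := hiffA i hi
    have hrep : (List.replicate cs.length false).getD i false = false := by
      rw [List.getD_eq_getElem _ false (by simpa using hi)]; simp
    rw [hrep] at hgd
    simp only [Bool.false_eq_true, false_or] at hgd
    rw [← List.getD_eq_getElem _ false h1, ← List.getD_eq_getElem _ false h2]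
    rw [Bool.eq_iff_iff, hgd, hsb, hiffB i hi]

-- the per-index contribution of A's output loop, at the character level
def gA (cs : List Char) (bold : List Bool) (i : Nat) : List Char :=
  (if bold.getD i false && (decide (i = 0) || !bold.getD (i-1) false) then ['<','b','>'] else []) ++
  [cs.getD i ' '] ++
  (if bold.getD i false && (decide (i = cs.length-1) || !bold.getD (i+1) false) then ['<','/','b','>'] else [])

-- the same contribution as A's loop builds it: a list of string-pieces
def gItems (cs : List Char) (bold : List Bool) (i : Nat) : List (List Char) :=
  (if bold.getD i false && (decide (i = 0) || !bold.getD (i-1) false) then [['<','b','>']] else []) ++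
  [[cs.getD i ' ']] ++
  (if bold.getD i false && (decide (i = cs.length-1) || !bold.getD (i+1) false) then [['<','/','b','>']] else [])

theorem flatten_flatMap {α β : Type} (l : List α) (f : α → List (List β)) :
    (l.flatMap f).flatten = l.flatMap (fun x => (f x).flatten) := by
  induction l with
  | nil => simp
  | cons x l ih => simp [ih]

theorem aRender_eq_flatMap (cs : List Char) (bold : List Bool) :
    ((List.range cs.length).foldl (fun acc i =>
      let acc1 := if bold.getD i false && (decide (i = 0) || !bold.getD (i-1) false)
                  then acc ++ [['<','b','>']] else acc
      let acc2 := acc1 ++ [[cs.getD i ' ']]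
      if bold.getD i false && (decide (i = cs.length-1) || !bold.getD (i+1) false)
      then acc2 ++ [['<','/','b','>']] else acc2) []).flatten
    = (List.range cs.length).flatMap (gA cs bold) := by
  have hbody : (List.range cs.length).foldl (fun acc i =>
      let acc1 := if bold.getD i false && (decide (i = 0) || !bold.getD (i-1) false)
                  then acc ++ [['<','b','>']] else acc
      let acc2 := acc1 ++ [[cs.getD i ' ']]
      if bold.getD i false && (decide (i = cs.length-1) || !bold.getD (i+1) false)
      then acc2 ++ [['<','/','b','>']] else acc2) []
      = (List.range cs.length).foldl (fun acc i => acc ++ gItems cs bold i) [] := by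
    apply PySem.List.foldl_congr_mem
    intro acc i _
    dsimp only
    unfold gItems
    split_ifs <;> simp
  rw [hbody, PySem.List.foldl_append_eq_flatMap, List.nil_append, flatten_flatMap]
  congr 1
  funext i
  unfold gItems gA
  split_ifs <;> simp

theorem runEnd_step (bold : List Bool) (j : Nat) (h1 : j < bold.length)
    (h2 : bold.getD j false = true) : runEnd bold j = runEnd bold (j+1) := by
  rw [runEnd, if_pos ⟨h1, h2⟩]

theorem runEnd_stop (bold : List Bool) (j : Nat)
    (h : ¬ (j < bold.length ∧ bold.getD j false = true)) : runEnd bold j = j := by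
  rw [runEnd]; simp only [if_neg h]

theorem render_eq (cs : List Char) (bold : List Bool) (hb : bold.length = cs.length) :
    ∀ (f i : Nat), cs.length - i ≤ f →
      ((bold.getD i false = true → i = 0 ∨ bold.getD (i-1) false = false) →
        (List.range' i (cs.length - i)).flatMap (gA cs bold) = (renderB cs bold i).flatten)
      ∧ (1 ≤ i → bold.getD i false = true → bold.getD (i-1) false = true →
        (List.range' i (cs.length - i)).flatMap (gA cs bold) =
          ((cs.drop i).take (runEnd bold i - i)) ++ '<'::'/'::'b'::'>'::(renderB cs bold (runEnd bold i)).flatten) := by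
  intro f
  induction f with
  | zero =>
    intro i hf
    have hin : ¬ i < cs.length := by omega
    constructor
    · intro _
      rw [show cs.length - i = 0 by omega, renderB, dif_neg hin]
      simp
    · intro _ hbi _
      have := getD_true_lt bold i hbi
      omega
  | succ f ih =>
    intro i hf
    by_cases hin : i < cs.length
    · have hrange : List.range' i (cs.length - i) = i :: List.range' (i+1) (cs.length - (i+1)) := by
        rw [show cs.length - i = (cs.length - (i+1)) + 1 by omega, List.range'_succ]
      have hdrop : cs.drop i = cs.getD i ' ' :: cs.drop (i+1) := by
        rw [List.getD_eq_getElem _ _ hin]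
        exact List.drop_eq_getElem_cons hin
      constructor
      · -- leaving-a-gap entry: A and B both start (or not) a fresh run at i
        intro hH
        by_cases hbi : bold.getD i false = true
        · have hOpen : (bold.getD i false && (decide (i = 0) || !bold.getD (i-1) false)) = true := by
            rcases hH hbi with h | h <;> rw [hbi, h] <;> simp
          rw [renderB, dif_pos hin, dif_pos hbi]
          by_cases hcl : i + 1 = cs.length ∨ bold.getD (i+1) false = false
          · have hClose : (bold.getD i false && (decide (i = cs.length-1) || !bold.getD (i+1) false)) = true := by
              rcases hcl with h | h
              · have hd : decide (i = cs.length - 1) = true := by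
                  simp [show i = cs.length - 1 by omega]
                rw [hbi, hd]; simp
              · rw [hbi, h]; simp
            have hre : runEnd bold i = i + 1 := by
              rw [runEnd_step bold i (by omega) hbi, runEnd_stop]
              rintro ⟨hlt, hgd⟩
              rcases hcl with h | h
              · omega
              · rw [h] at hgd; exact absurd hgd (by simp)
            have hnext : bold.getD (i+1) false = true → (i+1) = 0 ∨ bold.getD ((i+1)-1) false = false := by
              intro hgd
              rcases hcl with h | h
              · have := getD_true_lt bold (i+1) hgd; omega
              · rw [h] at hgd; exact absurd hgd (by simp)
            have hP1 := (ih (i+1) (by omega)).1 hnext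
            rw [hrange, List.flatMap_cons, hP1, hre]
            unfold gA
            rw [hOpen, hClose]
            simp [hdrop]
          · have hbnext : bold.getD (i+1) false = true := by
              cases h : bold.getD (i+1) false with
              | false => exact absurd (Or.inr h) hcl
              | true => rfl
            have hn1 : i + 1 < cs.length := by
              have := getD_true_lt bold (i+1) hbnext; omega
            have hClose : (bold.getD i false && (decide (i = cs.length-1) || !bold.getD (i+1) false)) = false := by
              rw [hbi, hbnext]
              simp [show i ≠ cs.length - 1 by omega]
            have hre : runEnd bold i = runEnd bold (i+1) := runEnd_step _ _ (by omega) hbi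
            have hP2 := (ih (i+1) (by omega)).2 (by omega) hbnext (by simpa using hbi)
            rw [hrange, List.flatMap_cons, hP2, hre]
            have hj : i + 1 ≤ runEnd bold (i+1) := runEnd_ge bold (i+1)
            rw [show (cs.drop i).take (runEnd bold (i+1) - i)
                  = cs.getD i ' ' :: (cs.drop (i+1)).take (runEnd bold (i+1) - (i+1)) by
              rw [hdrop, show runEnd bold (i+1) - i = (runEnd bold (i+1) - (i+1)) + 1 by omega,
                 List.take_succ_cons]]
            unfold gA
            rw [hOpen, hClose]
            simp
        · have hbif : bold.getD i false = false := by
            cases h : bold.getD i false with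
            | false => rfl
            | true => exact absurd h hbi
          have hOpen : (bold.getD i false && (decide (i = 0) || !bold.getD (i-1) false)) = false := by
            rw [hbif]; simp
          have hClose : (bold.getD i false && (decide (i = cs.length-1) || !bold.getD (i+1) false)) = false := by
            rw [hbif]; simp
          rw [renderB, dif_pos hin, dif_neg hbi]
          have hP1 := (ih (i+1) (by omega)).1 (fun _ => Or.inr (by simpa using hbif))
          rw [hrange, List.flatMap_cons, hP1]
          unfold gA
          rw [hOpen, hClose]
          simp
      · -- inside-a-run entry: the run's "<b>" is already emitted, A closes it at the run's end
        intro h1 hbi hprev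
        have hOpen : (bold.getD i false && (decide (i = 0) || !bold.getD (i-1) false)) = false := by
          rw [hbi, hprev]
          simp [show i ≠ 0 by omega]
        have hre0 : runEnd bold i = runEnd bold (i+1) :=
          runEnd_step _ _ (getD_true_lt bold i hbi) hbi
        by_cases hcl : i + 1 = cs.length ∨ bold.getD (i+1) false = false
        · have hClose : (bold.getD i false && (decide (i = cs.length-1) || !bold.getD (i+1) false)) = true := by
            rcases hcl with h | h
            · have hd : decide (i = cs.length - 1) = true := by
                simp [show i = cs.length - 1 by omega]
              rw [hbi, hd]; simp
            · rw [hbi, h]; simp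
          have hstop : runEnd bold (i+1) = i + 1 := by
            apply runEnd_stop
            rintro ⟨hlt, hgd⟩
            rcases hcl with h | h
            · omega
            · rw [h] at hgd; exact absurd hgd (by simp)
          have hnext : bold.getD (i+1) false = true → (i+1) = 0 ∨ bold.getD ((i+1)-1) false = false := by
            intro hgd
            rcases hcl with h | h
            · have := getD_true_lt bold (i+1) hgd; omega
            · rw [h] at hgd; exact absurd hgd (by simp)
          have hP1 := (ih (i+1) (by omega)).1 hnext
          rw [hrange, List.flatMap_cons, hP1, hre0, hstop]
          rw [show (cs.drop i).take (i + 1 - i) = [cs.getD i ' '] by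
            rw [hdrop, show i + 1 - i = 1 by omega]; simp]
          unfold gA
          rw [hOpen, hClose]
          simp
        · have hbnext : bold.getD (i+1) false = true := by
            cases h : bold.getD (i+1) false with
            | false => exact absurd (Or.inr h) hcl
            | true => rfl
          have hn1 : i + 1 < cs.length := by
            have := getD_true_lt bold (i+1) hbnext; omega
          have hClose : (bold.getD i false && (decide (i = cs.length-1) || !bold.getD (i+1) false)) = false := by
            rw [hbi, hbnext]
            simp [show i ≠ cs.length - 1 by omega]
          have hP2 := (ih (i+1) (by omega)).2 (by omega) hbnext (by simpa using hbi)
          rw [hrange, List.flatMap_cons, hP2, hre0]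
          have hj : i + 1 ≤ runEnd bold (i+1) := runEnd_ge bold (i+1)
          rw [show (cs.drop i).take (runEnd bold (i+1) - i)
                = cs.getD i ' ' :: (cs.drop (i+1)).take (runEnd bold (i+1) - (i+1)) by
            rw [hdrop, show runEnd bold (i+1) - i = (runEnd bold (i+1) - (i+1)) + 1 by omega,
               List.take_succ_cons]]
          unfold gA
          rw [hOpen, hClose]
          simp
    · have hnil : cs.length - i = 0 := by omega
      constructor
      · intro _
        rw [hnil, renderB, dif_neg hin]
        simp
      · intro _ hbi _
        have := getD_true_lt bold i hbi
        omega

-- ===== VERDICT (by name: the statement is the Claim_ definition above) =====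
theorem addBoldTag_spec : Claim_equal_addBoldTag := by
  intro words s _
  unfold Spec_addBoldTag
  simp only [addBoldTag, addBoldTag_alt]
  congr 1
  rw [bold_eq words s.toList, aRender_eq_flatMap]
  have hlen : (sweepBold words s.toList).2.length = s.toList.length :=
    (sweep_spec words s.toList s.toList.length).1
  have h := (render_eq s.toList (sweepBold words s.toList).2
    hlen s.toList.length 0 (by omega)).1 (fun _ => Or.inl rfl)
  rw [Nat.sub_zero, ← List.range_eq_range'] at h
  exact h
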